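-- pv_equiv track=rewrite | github.com/sa-fw-an/RAG-ChatBot | modules/knowledge_extractor.py | seems_factual
-- ===== SOURCE A (Python) =====
-- def seems_factual(sentence):
--     """Determine if a sentence appears to contain factual information."""
--     # Keywords that suggest factual content
--     factual_keywords = [
--         "is", "are", "was", "were", "has", "have", "had", "consists", "contains",
--         "comprises", "means", "refers to", "defined as", "founded", "created",
--         "discovered", "invented", "developed", "established", "functions", "works"
--     ]
--
--     # Check if any factual keywords are present
--     words = sentence.lower().split()
--     return any(keyword in words for keyword in factual_keywords)
-- ===== SOURCE B (Python) =====
-- FACTUAL_KEYWORDS = frozenset([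
--     "is", "are", "was", "were", "has", "have", "had", "consists", "contains",
--     "comprises", "means", "refers to", "defined as", "founded", "created",
--     "discovered", "invented", "developed", "established", "functions", "works"
-- ])
--
--
-- def _scan(words):
--     """Recursively scan the word list, returning early on the first keyword hit."""
--     if not words:
--         return False
--     if words[0] in FACTUAL_KEYWORDS:
--         return True
--     return _scan(words[1:])
--
--
-- def seems_factual(sentence):
--     """Determine if a sentence appears to contain factual information."""
--     return _scan(sentence.lower().split())
-- ===== Notes on version B (the rewrite author's own statement) =====
-- stated objective: alternative
-- what changed: Inverts the traversal and changes the decomposition: instead of scanning the word list once per keyword, B precomputes a frozenset of keywords and recursively scans the sentence's words with an early return on the first hit.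
import Mathlib
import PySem

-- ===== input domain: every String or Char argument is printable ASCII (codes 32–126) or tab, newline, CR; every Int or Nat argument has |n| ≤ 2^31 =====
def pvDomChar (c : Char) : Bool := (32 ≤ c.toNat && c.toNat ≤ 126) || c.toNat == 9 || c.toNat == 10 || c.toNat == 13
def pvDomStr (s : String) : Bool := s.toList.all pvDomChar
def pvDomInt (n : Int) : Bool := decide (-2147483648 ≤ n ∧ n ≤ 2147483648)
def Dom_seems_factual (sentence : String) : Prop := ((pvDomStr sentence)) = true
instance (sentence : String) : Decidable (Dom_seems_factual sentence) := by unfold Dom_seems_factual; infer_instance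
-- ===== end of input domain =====

-- B inverts the traversal and the decomposition: a precomputed keyword set and a recursive
-- early-return scan over the sentence's words, instead of scanning the word list once per
-- keyword (objective: alternative).

-- ===== PORT A =====
def seems_factual (sentence : String) : Bool :=
  let factual_keywords : List String :=
    ["is", "are", "was", "were", "has", "have", "had", "consists", "contains",
     "comprises", "means", "refers to", "defined as", "founded", "created",
     "discovered", "invented", "developed", "established", "functions", "works"]
  let words := PySem.Str.split₀ (PySem.Str.lower sentence)
  factual_keywords.any (fun keyword => words.contains keyword)

-- ===== PORT B =====
-- B's module-level frozenset FACTUAL_KEYWORDS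
def pvFactualKeywordSet : PySem.Set String :=
  PySem.Set.ofList
    ["is", "are", "was", "were", "has", "have", "had", "consists", "contains",
     "comprises", "means", "refers to", "defined as", "founded", "created",
     "discovered", "invented", "developed", "established", "functions", "works"]

-- B's helper _scan: recursive early-return scan of the word list
def pvScan : List String → Bool
  | [] => false
  | w :: ws => if PySem.Set.contains pvFactualKeywordSet w then true else pvScan ws

def seems_factual_alt (sentence : String) : Bool :=
  pvScan (PySem.Str.split₀ (PySem.Str.lower sentence))

-- ===== PRECONDITION & SPEC =====
def Spec_seems_factual (sentence : String) (out : Bool) : Prop := out = seems_factual_alt sentence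
instance (sentence : String) (out : Bool) : Decidable (Spec_seems_factual sentence out) := by unfold Spec_seems_factual; infer_instance

-- ===== CLAIM =====
def Claim_equal_seems_factual : Prop := ∀ (sentence : String), Dom_seems_factual sentence → Spec_seems_factual sentence (seems_factual sentence)

-- ===== LEMMAS AND PROOFS =====

-- the early-return scan is 'some word is in the set'
theorem pvScan_eq_any (ws : List String) :
    pvScan ws = ws.any (fun w => PySem.Set.contains pvFactualKeywordSet w) := by
  induction ws with
  | nil => rfl
  | cons w ws ih =>
    simp only [pvScan, List.any_cons, ih]
    by_cases h : PySem.Set.contains pvFactualKeywordSet w = true <;> simp [h, Bool.or_eq_true]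

-- 'some keyword is a word' = 'some word is a keyword'
theorem pv_any_mem_comm (xs ys : List String) :
    xs.any (fun k => ys.contains k) = ys.any (fun w => xs.contains w) := by
  rw [Bool.eq_iff_iff]
  simp only [List.any_eq_true, List.contains_eq_mem, decide_eq_true_eq]
  exact ⟨fun ⟨a, h1, h2⟩ => ⟨a, h2, h1⟩, fun ⟨a, h1, h2⟩ => ⟨a, h2, h1⟩⟩

-- ===== VERDICT =====
theorem seems_factual_spec : Claim_equal_seems_factual := by
  intro sentence _
  unfold Spec_seems_factual seems_factual seems_factual_alt
  rw [pvScan_eq_any, pv_any_mem_comm]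
  refine List.any_congr rfl (fun w => ?_)
  rw [Bool.eq_iff_iff, List.contains_iff_mem, PySem.Set.contains_iff, pvFactualKeywordSet,
      PySem.Set.mem_ofList]
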